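-- pv_equiv track=rewrite | github.com/antonissmal/git_exp | solution2.py | solution
-- ===== SOURCE A (Python) =====
-- def solution(A):
--     counts = {}
--
--     # count the occurrences of the numbers
--     for num in A:
--         if num not in counts:
--             counts[num] = 1
--         else:
--             counts[num] += 1
--
--
--     for count in counts.values():
--         # check for odd, there cannot be an equal pair for that number
--         if count % 2 != 0:
--             return False
--
--     # check for even, so we  can form pairs for each number
--     return True
--     pass
-- ===== SOURCE B (Python) =====
-- def solution(A):
--     odd = set()
--     for num in A:
--         if num in odd:
--             odd.discard(num)
--         else:
--             odd.add(num)
--     return not odd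
-- ===== Notes on version B (the rewrite author's own statement) =====
-- stated objective: simpler
-- what changed: Replaces the count dictionary plus a second parity-checking loop over its values with a single pass that toggles membership in an odd-occurrence set and tests emptiness at the end.
import Mathlib
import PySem

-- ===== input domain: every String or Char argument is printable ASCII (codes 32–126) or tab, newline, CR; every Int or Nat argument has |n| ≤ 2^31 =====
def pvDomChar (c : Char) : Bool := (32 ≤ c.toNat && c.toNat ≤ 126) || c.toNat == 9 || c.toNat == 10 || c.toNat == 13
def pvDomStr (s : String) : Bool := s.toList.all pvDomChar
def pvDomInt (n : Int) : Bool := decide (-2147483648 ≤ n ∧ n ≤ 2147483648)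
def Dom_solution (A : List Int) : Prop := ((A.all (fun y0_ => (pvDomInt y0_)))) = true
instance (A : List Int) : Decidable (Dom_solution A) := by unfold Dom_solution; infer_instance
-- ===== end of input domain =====

-- B replaces A's count dictionary plus a second values-scan for an odd count by a single
-- pass toggling membership in a set of odd-count elements, returning its emptiness (simpler).

-- ===== PORT A =====
def solution (A : List Int) : Bool :=
  let counts : PySem.Dict Int Int :=
    A.foldl (fun d num =>
      if d.contains num = false then d.insert num 1   -- counts[num] = 1
      else d.modify num 0 (· + 1)) PySem.Dict.empty   -- counts[num] += 1
  counts.values.all (fun count => PySem.Int.mod count 2 == 0)  -- first odd value → False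

-- ===== PORT B =====
def solution_alt (A : List Int) : Bool :=
  let odd : PySem.Set Int :=
    A.foldl (fun s num =>
      if PySem.Set.contains s num then PySem.Set.discard s num
      else PySem.Set.add s num) PySem.Set.empty
  odd.isEmpty   -- not odd

-- ===== PRECONDITION & SPEC =====
def Spec_solution (A : List Int) (out : Bool) : Prop := out = solution_alt A
instance (A : List Int) (out : Bool) : Decidable (Spec_solution A out) := by unfold Spec_solution; infer_instance

-- ===== CLAIM (what is proved, stated in full; the proofs are below) =====
def Claim_equal_solution : Prop := ∀ (A : List Int), Dom_solution A → Spec_solution A (solution A)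

-- ===== LEMMAS AND PROOFS =====

-- On a missing key, Python's `d[k] = 1` and `d[k] = d.get(k, 0) + 1` build the same dict.
lemma insert_one_eq_modify (d : PySem.Dict Int Int) (k : Int) (h : d.contains k = false) :
    d.insert k 1 = d.modify k 0 (· + 1) := by
  unfold PySem.Dict.modify PySem.Dict.insert
  simp [h, PySem.Dict.getD_of_not_contains _ _ h]

-- A's counting loop builds exactly Counter(A).
lemma solution_foldl_eq_counter (A : List Int) :
    A.foldl (fun d num =>
      if d.contains num = false then d.insert num 1
      else d.modify num 0 (· + 1)) PySem.Dict.empty = PySem.Dict.counter A := by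
  rw [PySem.Dict.counter_eq_foldl]
  congr 1
  funext d num
  by_cases h : d.contains num = false
  · simp [h, insert_one_eq_modify d num h]
  · simp [h]

-- membership in B's toggle fold: parity of the count decides membership
lemma mem_toggle_fold (l : List Int) (s : PySem.Set Int) (x : Int) :
    (x ∈ l.foldl (fun s num =>
      if PySem.Set.contains s num then PySem.Set.discard s num
      else PySem.Set.add s num) s) ↔ ((x ∈ s) ↔ l.count x % 2 = 0) := by
  induction l generalizing s with
  | nil => simp
  | cons num l ih =>
    simp only [List.foldl_cons, ih, List.count_cons]
    by_cases hm : num ∈ s <;> by_cases hx : num = x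
    · subst hx
      simp only [hm, if_pos, PySem.Set.mem_discard, PySem.Set.contains_eq_listContains,
        List.contains_iff_mem]
      simp; omega
    · have hx' : ¬ x = num := fun h => hx h.symm
      simp [hm, PySem.Set.mem_discard, hx', hx]
    · subst hx
      simp only [PySem.Set.contains_eq_listContains, List.contains_iff_mem, hm, if_false,
        PySem.Set.mem_add]
      simp; omega
    · have hx' : ¬ x = num := fun h => hx h.symm
      simp [hm, PySem.Set.mem_add, hx', hx]

-- ===== VERDICT (by name: the statement is the Claim_ definition above) =====
theorem solution_spec : Claim_equal_solution := by
  intro A _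
  simp only [Spec_solution, solution, solution_alt]
  rw [solution_foldl_eq_counter, Bool.eq_iff_iff]
  rw [List.isEmpty_iff, List.eq_nil_iff_forall_not_mem]
  have hv : (PySem.Dict.counter A).values =
      (PySem.Set.ofList A).map (fun k => ((A.count k : Int))) := by
    have h := PySem.Dict.items_counter (xs := A)
    simp only [PySem.Dict.values, h, List.map_map]
    rfl
  rw [hv]
  simp only [List.all_eq_true, List.mem_map, PySem.Set.mem_ofList, mem_toggle_fold]
  constructor
  · intro h x
    by_cases hx : x ∈ A
    · have hc := h _ ⟨x, hx, rfl⟩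
      simp at hc
      simp [PySem.Set.empty]
      omega
    · simp [List.count_eq_zero_of_not_mem hx, PySem.Set.empty]
  · intro h count hk
    obtain ⟨k, hkA, rfl⟩ := hk
    have hk2 := h k
    simp [PySem.Set.empty] at hk2
    simp
    omega
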